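-- pv_equiv track=rewrite | github.com/djbyrapatna/nascarModel | backend/queries/query.py | urlGen
-- ===== SOURCE A (Python) =====
-- _rrefUrl = "https://www.racing-reference.info/"
--
-- _loopStr = "loopdata/"
--
-- _practiceStr = "practice-results/"
--
-- _qualStr = "qual-results/"
--
-- _raceStr = "race-results/"
--
-- def urlGen(yrmin, yrmax, raceMin, raceMax, splitByType=True):
--     urls = []
--
--     strs = [_raceStr, _qualStr, _practiceStr, _loopStr]
--     for yr in range(yrmin, yrmax+1):
--         for raceNum in range(raceMin, raceMax+1):
--             dateStr = str(yr)+"-"+str(raceNum)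
--             urlGroup = ["","","",""]
--             for i, specStr in enumerate(strs):
--                 newUrl = _rrefUrl+specStr+dateStr+"/W/"
--                 urlGroup[i] = newUrl
--             urlGroup[2] += "1/"
--             urls.append(urlGroup)
--     #splits out URL's by type (practice, qualifying, race, loop) if needed for ordering
--     if splitByType:
--         urls = [url for urlG in urls for url in urlG]
--         urls.sort()
--         n = len(urls)
--         lUrls = urls[0:n//4]
--         pUrls = urls[n//4:n//2]
--         qUrls = urls[n//2:3*n//4]
--         rUrls = urls[3*n//4:n]
--         urls = [lUrls, pUrls, qUrls, rUrls]
--     return urls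
-- ===== SOURCE B (Python) =====
-- _rrefUrl = "https://www.racing-reference.info/"
--
-- _loopStr = "loopdata/"
--
-- _practiceStr = "practice-results/"
--
-- _qualStr = "qual-results/"
--
-- _raceStr = "race-results/"
--
-- def urlGen(yrmin, yrmax, raceMin, raceMax, splitByType=True):
--     # Four per-type lists, built in one pass; no global flatten+sort+slice.
--     loop, practice, qual, race = [], [], [], []
--     for yr in range(yrmin, yrmax + 1):
--         for raceNum in range(raceMin, raceMax + 1):
--             tail = str(yr) + "-" + str(raceNum) + "/W/"
--             loop.append(_rrefUrl + _loopStr + tail)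
--             practice.append(_rrefUrl + _practiceStr + tail + "1/")
--             qual.append(_rrefUrl + _qualStr + tail)
--             race.append(_rrefUrl + _raceStr + tail)
--     if splitByType:
--         return [sorted(loop), sorted(practice), sorted(qual), sorted(race)]
--     return [[r, q, p, l] for r, q, p, l in zip(race, qual, practice, loop)]
-- ===== Notes on version B (the rewrite author's own statement) =====
-- stated objective: simpler
-- what changed: B builds four per-type URL lists in one pass and, for splitByType, sorts each list independently (the per-type lists are exactly the quarter slices of A's global sort because the type prefixes order the groups), and for the non-split case zips the four lists back into per-(yr,race) groups, eliminating A's enumerate/index-assignment group construction and its flatten+global-sort+quarter-slice step.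
import Mathlib
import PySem

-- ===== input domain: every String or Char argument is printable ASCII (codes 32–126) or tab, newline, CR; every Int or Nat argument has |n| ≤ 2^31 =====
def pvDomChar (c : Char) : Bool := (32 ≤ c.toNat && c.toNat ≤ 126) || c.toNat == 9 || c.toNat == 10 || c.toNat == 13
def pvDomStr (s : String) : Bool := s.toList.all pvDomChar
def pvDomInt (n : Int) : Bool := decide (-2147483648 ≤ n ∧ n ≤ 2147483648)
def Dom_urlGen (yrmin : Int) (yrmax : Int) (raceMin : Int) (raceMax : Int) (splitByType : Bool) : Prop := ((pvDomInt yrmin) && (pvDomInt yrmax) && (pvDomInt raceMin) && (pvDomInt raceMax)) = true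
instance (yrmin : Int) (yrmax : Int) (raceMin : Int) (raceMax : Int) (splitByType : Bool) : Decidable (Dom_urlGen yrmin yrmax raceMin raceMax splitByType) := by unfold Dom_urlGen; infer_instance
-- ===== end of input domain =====

-- B builds four per-type URL lists in one pass and sorts each independently (zip for the
-- non-split case), replacing A's flatten + global sort + quarter-slice; objective: simpler.

-- ===== PORT A =====
def urlGen (yrmin : Int) (yrmax : Int) (raceMin : Int) (raceMax : Int) (splitByType : Bool) : List (List String) :=
  let strs : List String := ["race-results/", "qual-results/", "practice-results/", "loopdata/"]
  let urls : List (List String) :=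
    (PySem.List.pyRange yrmin (yrmax + 1) 1).foldl (fun urls yr =>
      (PySem.List.pyRange raceMin (raceMax + 1) 1).foldl (fun urls raceNum =>
        let dateStr := PySem.Int.toStr yr ++ "-" ++ PySem.Int.toStr raceNum
        let urlGroup : List String := ["", "", "", ""]
        let urlGroup := (PySem.List.enumerate strs 0).foldl (fun urlGroup p =>
          let newUrl := "https://www.racing-reference.info/" ++ p.2 ++ dateStr ++ "/W/"
          PySem.List.pySetD urlGroup p.1 newUrl) urlGroup
        let urlGroup := PySem.List.pySetD urlGroup 2 (PySem.List.pyGetD urlGroup 2 "" ++ "1/")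
        urls ++ [urlGroup]) urls) []
  if splitByType then
    let flat := urls.flatMap (fun urlG => urlG)
    let sortedUrls := PySem.List.sorted flat (fun x => x) false
    let n : Int := sortedUrls.length
    [PySem.List.slice sortedUrls (some 0) (some (PySem.Int.floordiv n 4)),
     PySem.List.slice sortedUrls (some (PySem.Int.floordiv n 4)) (some (PySem.Int.floordiv n 2)),
     PySem.List.slice sortedUrls (some (PySem.Int.floordiv n 2)) (some (PySem.Int.floordiv (3 * n) 4)),
     PySem.List.slice sortedUrls (some (PySem.Int.floordiv (3 * n) 4)) (some n)]
  else urls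

-- ===== PORT B =====
def urlGen_alt (yrmin : Int) (yrmax : Int) (raceMin : Int) (raceMax : Int) (splitByType : Bool) : List (List String) :=
  let quad : List String × List String × List String × List String :=
    (PySem.List.pyRange yrmin (yrmax + 1) 1).foldl (fun acc yr =>
      (PySem.List.pyRange raceMin (raceMax + 1) 1).foldl (fun acc raceNum =>
        let tail := PySem.Int.toStr yr ++ "-" ++ PySem.Int.toStr raceNum ++ "/W/"
        (acc.1 ++ ["https://www.racing-reference.info/" ++ "loopdata/" ++ tail],
         acc.2.1 ++ ["https://www.racing-reference.info/" ++ "practice-results/" ++ tail ++ "1/"],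
         acc.2.2.1 ++ ["https://www.racing-reference.info/" ++ "qual-results/" ++ tail],
         acc.2.2.2 ++ ["https://www.racing-reference.info/" ++ "race-results/" ++ tail])) acc)
      (([], [], [], []))
  if splitByType then
    [PySem.List.sorted quad.1 (fun x => x) false,
     PySem.List.sorted quad.2.1 (fun x => x) false,
     PySem.List.sorted quad.2.2.1 (fun x => x) false,
     PySem.List.sorted quad.2.2.2 (fun x => x) false]
  else
    (((quad.2.2.2.zip quad.2.2.1).zip quad.2.1).zip quad.1).map
      (fun rqpl => [rqpl.1.1.1, rqpl.1.1.2, rqpl.1.2, rqpl.2])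

-- ===== PRECONDITION & SPEC =====
def Spec_urlGen (yrmin : Int) (yrmax : Int) (raceMin : Int) (raceMax : Int) (splitByType : Bool) (out : List (List String)) : Prop := out = urlGen_alt yrmin yrmax raceMin raceMax splitByType
instance (yrmin : Int) (yrmax : Int) (raceMin : Int) (raceMax : Int) (splitByType : Bool) (out : List (List String)) : Decidable (Spec_urlGen yrmin yrmax raceMin raceMax splitByType out) := by unfold Spec_urlGen; infer_instance

-- ===== CLAIM (what is proved, stated in full; the proofs are below) =====
def Claim_equal_urlGen : Prop := ∀ (yrmin : Int) (yrmax : Int) (raceMin : Int) (raceMax : Int) (splitByType : Bool), Dom_urlGen yrmin yrmax raceMin raceMax splitByType → Spec_urlGen yrmin yrmax raceMin raceMax splitByType (urlGen yrmin yrmax raceMin raceMax splitByType)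

-- ===== LEMMAS AND PROOFS =====

-- canonical URL builders (A's association of the string appends) and the (yr, race) pair list
def pvBase : String := "https://www.racing-reference.info/"
def pvDate (y r : Int) : String := PySem.Int.toStr y ++ "-" ++ PySem.Int.toStr r
def pvUrlA (spec : String) (y r : Int) : String := pvBase ++ spec ++ pvDate y r ++ "/W/"
def pvL (y r : Int) : String := pvUrlA "loopdata/" y r
def pvP (y r : Int) : String := pvUrlA "practice-results/" y r ++ "1/"
def pvQ (y r : Int) : String := pvUrlA "qual-results/" y r
def pvR (y r : Int) : String := pvUrlA "race-results/" y r
-- B's association of the same strings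
def pvUrlB (spec : String) (y r : Int) : String := pvBase ++ spec ++ (pvDate y r ++ "/W/")
def pvL' (y r : Int) : String := pvUrlB "loopdata/" y r
def pvP' (y r : Int) : String := pvUrlB "practice-results/" y r ++ "1/"
def pvQ' (y r : Int) : String := pvUrlB "qual-results/" y r
def pvR' (y r : Int) : String := pvUrlB "race-results/" y r
def pvPairs (yrmin yrmax raceMin raceMax : Int) : List (Int × Int) :=
  (PySem.List.pyRange yrmin (yrmax + 1) 1).flatMap
    (fun y => (PySem.List.pyRange raceMin (raceMax + 1) 1).map (fun r => (y, r)))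

lemma pvL'_eq (y r : Int) : pvL' y r = pvL y r := by
  simp [pvL', pvL, pvUrlA, pvUrlB, String.append_assoc]
lemma pvP'_eq (y r : Int) : pvP' y r = pvP y r := by
  simp [pvP', pvP, pvUrlA, pvUrlB, String.append_assoc]
lemma pvQ'_eq (y r : Int) : pvQ' y r = pvQ y r := by
  simp [pvQ', pvQ, pvUrlA, pvUrlB, String.append_assoc]
lemma pvR'_eq (y r : Int) : pvR' y r = pvR y r := by
  simp [pvR', pvR, pvUrlA, pvUrlB, String.append_assoc]

-- generic double-loop shapes
lemma foldl2_append {α : Type} (ys rs : List Int) (g : Int → Int → α) (init : List α) :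
    ys.foldl (fun acc y => rs.foldl (fun acc2 r => acc2 ++ [g y r]) acc) init
      = init ++ ys.flatMap (fun y => rs.map (g y)) := by
  induction ys generalizing init with
  | nil => simp
  | cons y ys ih =>
      rw [List.foldl_cons, ih, PySem.List.foldl_append_singleton_eq_map]
      simp [List.append_assoc]

lemma foldl1_quad {α : Type} (rs : List Int) (f1 f2 f3 f4 : Int → α)
    (init : List α × List α × List α × List α) :
    rs.foldl (fun acc r =>
        (acc.1 ++ [f1 r], acc.2.1 ++ [f2 r], acc.2.2.1 ++ [f3 r], acc.2.2.2 ++ [f4 r])) init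
      = (init.1 ++ rs.map f1, init.2.1 ++ rs.map f2, init.2.2.1 ++ rs.map f3,
         init.2.2.2 ++ rs.map f4) := by
  induction rs generalizing init with
  | nil => simp
  | cons r rs ih => simp [ih]

lemma foldl2_quad {α : Type} (ys rs : List Int) (f1 f2 f3 f4 : Int → Int → α)
    (init : List α × List α × List α × List α) :
    ys.foldl (fun acc y => rs.foldl (fun acc2 r =>
        (acc2.1 ++ [f1 y r], acc2.2.1 ++ [f2 y r], acc2.2.2.1 ++ [f3 y r],
         acc2.2.2.2 ++ [f4 y r])) acc) init
      = (init.1 ++ (ys.flatMap (fun y => rs.map (f1 y))),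
         init.2.1 ++ (ys.flatMap (fun y => rs.map (f2 y))),
         init.2.2.1 ++ (ys.flatMap (fun y => rs.map (f3 y))),
         init.2.2.2 ++ (ys.flatMap (fun y => rs.map (f4 y)))) := by
  induction ys generalizing init with
  | nil => simp
  | cons y ys ih =>
      rw [List.foldl_cons, ih, foldl1_quad]
      simp [List.append_assoc]


lemma flatPairs {α : Type} (ys rs : List Int) (g : Int → Int → α) :
    ys.flatMap (fun y => rs.map (g y))
      = (ys.flatMap (fun y => rs.map (fun r => (y, r)))).map (fun p => g p.1 p.2) := by
  induction ys with
  | nil => rfl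
  | cons y ys ih => simp [ih, List.map_map, Function.comp]

lemma flatMap_id_map {α β : Type} (l : List α) (f : α → List β) :
    (l.map f).flatMap (fun x => x) = l.flatMap f := by
  induction l with
  | nil => rfl
  | cons x l ih => simp [ih]

def pvTail (y r : Int) : String := pvDate y r ++ "/W/"

-- A's accumulated list of groups
lemma A_urls (yrmin yrmax raceMin raceMax : Int) :
    (PySem.List.pyRange yrmin (yrmax + 1) 1).foldl (fun urls yr =>
      (PySem.List.pyRange raceMin (raceMax + 1) 1).foldl (fun urls raceNum =>
        let dateStr := PySem.Int.toStr yr ++ "-" ++ PySem.Int.toStr raceNum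
        let urlGroup : List String := ["", "", "", ""]
        let urlGroup := (PySem.List.enumerate
            (["race-results/", "qual-results/", "practice-results/", "loopdata/"] : List String)
            0).foldl (fun urlGroup p =>
          let newUrl := "https://www.racing-reference.info/" ++ p.2 ++ dateStr ++ "/W/"
          PySem.List.pySetD urlGroup p.1 newUrl) urlGroup
        let urlGroup := PySem.List.pySetD urlGroup 2 (PySem.List.pyGetD urlGroup 2 "" ++ "1/")
        urls ++ [urlGroup]) urls) []
      = (pvPairs yrmin yrmax raceMin raceMax).map
          (fun p => [pvR p.1 p.2, pvQ p.1 p.2, pvP p.1 p.2, pvL p.1 p.2]) := by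
  exact (foldl2_append (PySem.List.pyRange yrmin (yrmax + 1) 1)
      (PySem.List.pyRange raceMin (raceMax + 1) 1)
      (fun y r => [pvR y r, pvQ y r, pvP y r, pvL y r]) []).trans
    (by rw [List.nil_append, flatPairs]; rfl)

-- B's quadruple of per-type lists
lemma B_quad (yrmin yrmax raceMin raceMax : Int) :
    (PySem.List.pyRange yrmin (yrmax + 1) 1).foldl (fun acc yr =>
      (PySem.List.pyRange raceMin (raceMax + 1) 1).foldl (fun acc raceNum =>
        let tail := PySem.Int.toStr yr ++ "-" ++ PySem.Int.toStr raceNum ++ "/W/"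
        (acc.1 ++ ["https://www.racing-reference.info/" ++ "loopdata/" ++ tail],
         acc.2.1 ++ ["https://www.racing-reference.info/" ++ "practice-results/" ++ tail ++ "1/"],
         acc.2.2.1 ++ ["https://www.racing-reference.info/" ++ "qual-results/" ++ tail],
         acc.2.2.2 ++ ["https://www.racing-reference.info/" ++ "race-results/" ++ tail])) acc)
      (([], [], [], []))
      = ((pvPairs yrmin yrmax raceMin raceMax).map (fun p => pvL p.1 p.2),
         (pvPairs yrmin yrmax raceMin raceMax).map (fun p => pvP p.1 p.2),
         (pvPairs yrmin yrmax raceMin raceMax).map (fun p => pvQ p.1 p.2),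
         (pvPairs yrmin yrmax raceMin raceMax).map (fun p => pvR p.1 p.2)) := by
  have h := foldl2_quad (PySem.List.pyRange yrmin (yrmax + 1) 1)
      (PySem.List.pyRange raceMin (raceMax + 1) 1)
      (fun y r => pvBase ++ "loopdata/" ++ pvTail y r)
      (fun y r => pvBase ++ "practice-results/" ++ pvTail y r ++ "1/")
      (fun y r => pvBase ++ "qual-results/" ++ pvTail y r)
      (fun y r => pvBase ++ "race-results/" ++ pvTail y r) ([], [], [], [])
  refine h.trans ?_
  simp only [List.nil_append]
  rw [flatPairs _ _ (fun y r => pvBase ++ "loopdata/" ++ pvTail y r),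
      flatPairs _ _ (fun y r => pvBase ++ "practice-results/" ++ pvTail y r ++ "1/"),
      flatPairs _ _ (fun y r => pvBase ++ "qual-results/" ++ pvTail y r),
      flatPairs _ _ (fun y r => pvBase ++ "race-results/" ++ pvTail y r)]
  refine congrArg₂ _ ?_ (congrArg₂ _ ?_ (congrArg₂ _ ?_ ?_)) <;>
    exact List.map_congr_left (fun p _ => by
      first
        | exact pvL'_eq p.1 p.2
        | exact pvP'_eq p.1 p.2
        | exact pvQ'_eq p.1 p.2
        | exact pvR'_eq p.1 p.2)

-- zip of four maps over one list
lemma zip4_maps {α β : Type} (xs : List α) (f g h k : α → β) :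
    ((((xs.map f).zip (xs.map g)).zip (xs.map h)).zip (xs.map k)).map
        (fun t => [t.1.1.1, t.1.1.2, t.1.2, t.2])
      = xs.map (fun x => [f x, g x, h x, k x]) := by
  induction xs with
  | nil => rfl
  | cons x xs ih => simp [ih]

-- flatten of the groups is a permutation of the four per-type lists concatenated
lemma perm4 {α β : Type} [DecidableEq β] (xs : List α) (f1 f2 f3 f4 : α → β) :
    ((xs.map f1) ++ (xs.map f2) ++ (xs.map f3) ++ (xs.map f4)).Perm
      (xs.flatMap (fun x => [f4 x, f3 x, f2 x, f1 x])) := by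
  induction xs with
  | nil => rfl
  | cons x xs ih =>
      rw [List.perm_iff_count]
      intro b
      have h := ih.count_eq b
      simp only [List.count_append] at h
      simp only [List.map_cons, List.flatMap_cons, List.count_append, List.count_cons,
        List.cons_append, List.nil_append]
      omega

-- lexicographic comparison of urls with distinct type prefixes
theorem chars_lex (x y : Char) (h : x < y) (u v : List Char) :
    ∀ (c : List Char), List.Lex (·<·) (c ++ x::u) (c ++ y::v)
  | [] => List.Lex.rel h
  | _ :: c => List.Lex.cons (chars_lex x y h u v c)

lemma url_lt (sp1 sp2 : String) {x y : Char} {r1 r2 : List Char}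
    (h1 : sp1.toList = x :: r1) (h2 : sp2.toList = y :: r2) (hxy : x < y) (s t : String) :
    pvBase ++ (sp1 ++ s) < pvBase ++ (sp2 ++ t) := by
  rw [String.lt_iff_toList_lt]
  refine (List.lt_iff_lex_lt _ _).mpr ?_
  simp only [String.toList_append, h1, h2, List.cons_append]
  exact chars_lex x y hxy _ _ _


lemma lt_LP (y r y' r' : Int) : pvL y r < pvP y' r' := by
  rw [← pvL'_eq, ← pvP'_eq]
  show pvBase ++ "loopdata/" ++ pvTail y r
      < pvBase ++ "practice-results/" ++ pvTail y' r' ++ "1/"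
  simp only [String.append_assoc]
  exact url_lt "loopdata/" "practice-results/"
    (show "loopdata/".toList = 'l' :: "oopdata/".toList from rfl)
    (show "practice-results/".toList = 'p' :: "ractice-results/".toList from rfl)
    (by decide) _ _

lemma lt_LQ (y r y' r' : Int) : pvL y r < pvQ y' r' := by
  rw [← pvL'_eq, ← pvQ'_eq]
  show pvBase ++ "loopdata/" ++ pvTail y r < pvBase ++ "qual-results/" ++ pvTail y' r'
  simp only [String.append_assoc]
  exact url_lt "loopdata/" "qual-results/"
    (show "loopdata/".toList = 'l' :: "oopdata/".toList from rfl)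
    (show "qual-results/".toList = 'q' :: "ual-results/".toList from rfl)
    (by decide) _ _

lemma lt_LR (y r y' r' : Int) : pvL y r < pvR y' r' := by
  rw [← pvL'_eq, ← pvR'_eq]
  show pvBase ++ "loopdata/" ++ pvTail y r < pvBase ++ "race-results/" ++ pvTail y' r'
  simp only [String.append_assoc]
  exact url_lt "loopdata/" "race-results/"
    (show "loopdata/".toList = 'l' :: "oopdata/".toList from rfl)
    (show "race-results/".toList = 'r' :: "ace-results/".toList from rfl)
    (by decide) _ _

lemma lt_PQ (y r y' r' : Int) : pvP y r < pvQ y' r' := by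
  rw [← pvP'_eq, ← pvQ'_eq]
  show pvBase ++ "practice-results/" ++ pvTail y r ++ "1/"
      < pvBase ++ "qual-results/" ++ pvTail y' r'
  simp only [String.append_assoc]
  exact url_lt "practice-results/" "qual-results/"
    (show "practice-results/".toList = 'p' :: "ractice-results/".toList from rfl)
    (show "qual-results/".toList = 'q' :: "ual-results/".toList from rfl)
    (by decide) _ _

lemma lt_PR (y r y' r' : Int) : pvP y r < pvR y' r' := by
  rw [← pvP'_eq, ← pvR'_eq]
  show pvBase ++ "practice-results/" ++ pvTail y r ++ "1/"
      < pvBase ++ "race-results/" ++ pvTail y' r'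
  simp only [String.append_assoc]
  exact url_lt "practice-results/" "race-results/"
    (show "practice-results/".toList = 'p' :: "ractice-results/".toList from rfl)
    (show "race-results/".toList = 'r' :: "ace-results/".toList from rfl)
    (by decide) _ _

lemma lt_QR (y r y' r' : Int) : pvQ y r < pvR y' r' := by
  rw [← pvQ'_eq, ← pvR'_eq]
  show pvBase ++ "qual-results/" ++ pvTail y r < pvBase ++ "race-results/" ++ pvTail y' r'
  simp only [String.append_assoc]
  exact url_lt "qual-results/" "race-results/"
    (show "qual-results/".toList = 'q' :: "ual-results/".toList from rfl)
    (show "race-results/".toList = 'r' :: "ace-results/".toList from rfl)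
    (by decide) _ _

-- sorting the flattened groups is the four per-type sorted lists in prefix order
lemma sorted_flat (pairs : List (Int × Int)) :
    PySem.List.sorted
        (pairs.flatMap (fun p => [pvR p.1 p.2, pvQ p.1 p.2, pvP p.1 p.2, pvL p.1 p.2]))
        (fun x => x) false
      = PySem.List.sorted (pairs.map fun p => pvL p.1 p.2) (fun x => x) false
        ++ PySem.List.sorted (pairs.map fun p => pvP p.1 p.2) (fun x => x) false
        ++ PySem.List.sorted (pairs.map fun p => pvQ p.1 p.2) (fun x => x) false
        ++ PySem.List.sorted (pairs.map fun p => pvR p.1 p.2) (fun x => x) false := by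
  have hperm : ((PySem.List.sorted (pairs.map fun p => pvL p.1 p.2) (fun x => x) false
        ++ PySem.List.sorted (pairs.map fun p => pvP p.1 p.2) (fun x => x) false
        ++ PySem.List.sorted (pairs.map fun p => pvQ p.1 p.2) (fun x => x) false
        ++ PySem.List.sorted (pairs.map fun p => pvR p.1 p.2) (fun x => x) false)).Perm
      (pairs.flatMap (fun p => [pvR p.1 p.2, pvQ p.1 p.2, pvP p.1 p.2, pvL p.1 p.2])) := by
    refine List.Perm.trans ?_ (perm4 pairs (fun p => pvL p.1 p.2) (fun p => pvP p.1 p.2)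
      (fun p => pvQ p.1 p.2) (fun p => pvR p.1 p.2))
    exact (((PySem.List.sorted_perm _ _ _).append
      (PySem.List.sorted_perm _ _ _)).append
        (PySem.List.sorted_perm _ _ _)).append (PySem.List.sorted_perm _ _ _)
  have memL : ∀ a ∈ PySem.List.sorted (pairs.map fun p => pvL p.1 p.2) (fun x => x) false,
      ∃ y r, a = pvL y r := by
    intro a ha
    rw [PySem.List.mem_sorted] at ha
    obtain ⟨p, _, hp⟩ := List.mem_map.mp ha
    exact ⟨p.1, p.2, hp.symm⟩
  have memP : ∀ a ∈ PySem.List.sorted (pairs.map fun p => pvP p.1 p.2) (fun x => x) false,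
      ∃ y r, a = pvP y r := by
    intro a ha
    rw [PySem.List.mem_sorted] at ha
    obtain ⟨p, _, hp⟩ := List.mem_map.mp ha
    exact ⟨p.1, p.2, hp.symm⟩
  have memQ : ∀ a ∈ PySem.List.sorted (pairs.map fun p => pvQ p.1 p.2) (fun x => x) false,
      ∃ y r, a = pvQ y r := by
    intro a ha
    rw [PySem.List.mem_sorted] at ha
    obtain ⟨p, _, hp⟩ := List.mem_map.mp ha
    exact ⟨p.1, p.2, hp.symm⟩
  have memR : ∀ a ∈ PySem.List.sorted (pairs.map fun p => pvR p.1 p.2) (fun x => x) false,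
      ∃ y r, a = pvR y r := by
    intro a ha
    rw [PySem.List.mem_sorted] at ha
    obtain ⟨p, _, hp⟩ := List.mem_map.mp ha
    exact ⟨p.1, p.2, hp.symm⟩
  have hpair : ((PySem.List.sorted (pairs.map fun p => pvL p.1 p.2) (fun x => x) false
        ++ PySem.List.sorted (pairs.map fun p => pvP p.1 p.2) (fun x => x) false
        ++ PySem.List.sorted (pairs.map fun p => pvQ p.1 p.2) (fun x => x) false
        ++ PySem.List.sorted (pairs.map fun p => pvR p.1 p.2) (fun x => x) false)).Pairwise
      (fun a b => a ≤ b) := by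
    simp only [List.pairwise_append]
    refine ⟨⟨⟨PySem.List.sorted_pairwise _ _, PySem.List.sorted_pairwise _ _, ?_⟩,
      PySem.List.sorted_pairwise _ _, ?_⟩, PySem.List.sorted_pairwise _ _, ?_⟩
    · intro a ha b hb
      obtain ⟨y, r, rfl⟩ := memL a ha
      obtain ⟨y', r', rfl⟩ := memP b hb
      exact le_of_lt (lt_LP y r y' r')
    · intro a ha b hb
      obtain ⟨y', r', rfl⟩ := memQ b hb
      rcases List.mem_append.mp ha with ha | ha
      · obtain ⟨y, r, rfl⟩ := memL a ha
        exact le_of_lt (lt_LQ y r y' r')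
      · obtain ⟨y, r, rfl⟩ := memP a ha
        exact le_of_lt (lt_PQ y r y' r')
    · intro a ha b hb
      obtain ⟨y', r', rfl⟩ := memR b hb
      rcases List.mem_append.mp ha with ha | ha
      · rcases List.mem_append.mp ha with ha | ha
        · obtain ⟨y, r, rfl⟩ := memL a ha
          exact le_of_lt (lt_LR y r y' r')
        · obtain ⟨y, r, rfl⟩ := memP a ha
          exact le_of_lt (lt_PR y r y' r')
      · obtain ⟨y, r, rfl⟩ := memQ a ha
        exact le_of_lt (lt_QR y r y' r')
  exact PySem.List.sorted_id_eq_of_perm_of_pairwise _ _ hperm hpair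

-- the four quarter slices of a 4m-element concatenation of m-element blocks
lemma quarter_slices (sL sP sQ sR S : List String) (m : Nat)
    (hS : S = sL ++ sP ++ sQ ++ sR)
    (hL : sL.length = m) (hP : sP.length = m) (hQ : sQ.length = m) (hR : sR.length = m) :
    [PySem.List.slice S (some 0) (some (PySem.Int.floordiv (S.length : Int) 4)),
     PySem.List.slice S (some (PySem.Int.floordiv (S.length : Int) 4))
       (some (PySem.Int.floordiv (S.length : Int) 2)),
     PySem.List.slice S (some (PySem.Int.floordiv (S.length : Int) 2))
       (some (PySem.Int.floordiv (3 * (S.length : Int)) 4)),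
     PySem.List.slice S (some (PySem.Int.floordiv (3 * (S.length : Int)) 4))
       (some (S.length : Int))] = [sL, sP, sQ, sR] := by
  have hn : S.length = 4 * m := by
    subst hS; simp [hL, hP, hQ, hR]; omega
  have hnI : (S.length : Int) = ((4 * m : Nat) : Int) := by rw [hn]
  have f4 : PySem.Int.floordiv (S.length : Int) 4 = ((m : Nat) : Int) := by
    rw [PySem.Int.floordiv_eq_ediv_of_pos (by norm_num), hnI]; push_cast; omega
  have f2 : PySem.Int.floordiv (S.length : Int) 2 = ((2 * m : Nat) : Int) := by
    rw [PySem.Int.floordiv_eq_ediv_of_pos (by norm_num), hnI]; push_cast; omega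
  have f34 : PySem.Int.floordiv (3 * (S.length : Int)) 4 = ((3 * m : Nat) : Int) := by
    rw [PySem.Int.floordiv_eq_ediv_of_pos (by norm_num), hnI]; push_cast; omega
  rw [f4, f2, f34, hnI]
  rw [PySem.List.slice_natCast, PySem.List.slice_natCast, PySem.List.slice_natCast]
  rw [PySem.List.slice_zero_start, PySem.List.slice_to_natCast]
  have h2m : 2 * m - m = m := by omega
  have h3m : 3 * m - 2 * m = m := by omega
  have h4m : 4 * m - 3 * m = m := by omega
  rw [h2m, h3m, h4m]
  subst hS
  have hA : sL ++ sP ++ sQ ++ sR = sL ++ (sP ++ sQ ++ sR) := by simp [List.append_assoc]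
  have hB : sL ++ sP ++ sQ ++ sR = (sL ++ sP) ++ (sQ ++ sR) := by simp [List.append_assoc]
  have hC : sL ++ sP ++ sQ ++ sR = (sL ++ sP ++ sQ) ++ sR := by simp [List.append_assoc]
  have e1 : (sL ++ sP ++ sQ ++ sR).take m = sL := by
    rw [hA]; exact List.take_left' hL
  have e2 : ((sL ++ sP ++ sQ ++ sR).drop m).take m = sP := by
    rw [hA, List.drop_left' hL]
    have : sP ++ sQ ++ sR = sP ++ (sQ ++ sR) := by simp [List.append_assoc]
    rw [this]; exact List.take_left' hP
  have e3 : ((sL ++ sP ++ sQ ++ sR).drop (2 * m)).take m = sQ := by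
    rw [hB, List.drop_left' (by simp [hL, hP]; omega)]
    exact List.take_left' hQ
  have e4 : ((sL ++ sP ++ sQ ++ sR).drop (3 * m)).take m = sR := by
    rw [hC, List.drop_left' (by simp [hL, hP, hQ]; omega)]
    rw [← hR, List.take_length]
  rw [e1, e2, e3, e4]

-- ===== VERDICT (by name: the statement is the Claim_ definition above) =====
theorem urlGen_spec : Claim_equal_urlGen := by
  intro yrmin yrmax raceMin raceMax splitByType _
  unfold Spec_urlGen
  simp only [urlGen, urlGen_alt]
  rw [A_urls, B_quad]
  cases splitByType with
  | false =>
      simp only [if_neg Bool.false_ne_true]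
      rw [zip4_maps]
  | true =>
      rw [flatMap_id_map, sorted_flat]
      exact quarter_slices _ _ _ _ _ ((pvPairs yrmin yrmax raceMin raceMax).length) rfl
        (by rw [PySem.List.length_sorted, List.length_map])
        (by rw [PySem.List.length_sorted, List.length_map])
        (by rw [PySem.List.length_sorted, List.length_map])
        (by rw [PySem.List.length_sorted, List.length_map])
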